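-- pv_equiv track=rewrite | github.com/NimaFathi/Bioinformatics-Rosalind-Textbook | BookProblems/CHapter 9/BWMatching(BA9L)/BWMatching speedup implementation(Using Count).py | count
-- ===== SOURCE A (Python) =====
-- def count(bwt):
--     CountArray = list()
--     dollar_count = 0
--     A_count = 0
--     C_count = 0
--     G_count = 0
--     T_count = 0
--     for ch in bwt:
--         count = [dollar_count, A_count, C_count, G_count, T_count ]
--         CountArray.append(count)
--         if ch == '$':
--             dollar_count += 1
--         elif ch == 'A':
--             A_count += 1
--         elif ch == 'C':
--             C_count += 1
--         elif ch == 'G':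
--             G_count +=1
--         else:
--             T_count += 1
--
--     CountArray.append([dollar_count,A_count,C_count,G_count,T_count])
--     return CountArray
-- ===== SOURCE B (Python) =====
-- def _prefix(bwt, pred):
--     # n+1 cumulative counts of characters satisfying pred in prefixes of bwt
--     out = [0]
--     s = 0
--     for ch in bwt:
--         s += 1 if pred(ch) else 0
--         out.append(s)
--     return out
--
--
-- def count(bwt):
--     d = _prefix(bwt, lambda c: c == '$')
--     a = _prefix(bwt, lambda c: c == 'A')
--     c = _prefix(bwt, lambda c: c == 'C')
--     g = _prefix(bwt, lambda c: c == 'G')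
--     t = _prefix(bwt, lambda c: c not in '$ACG')
--     return [list(row) for row in zip(d, a, c, g, t)]
-- ===== Notes on version B (the rewrite author's own statement) =====
-- stated objective: alternative
-- what changed: B builds the table column-by-column: five separate cumulative prefix-count passes (one per symbol, with non-$ACG characters counted as T like A's catch-all else) zipped together into rows, instead of A's single row-by-row pass carrying five counters.
import Mathlib
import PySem

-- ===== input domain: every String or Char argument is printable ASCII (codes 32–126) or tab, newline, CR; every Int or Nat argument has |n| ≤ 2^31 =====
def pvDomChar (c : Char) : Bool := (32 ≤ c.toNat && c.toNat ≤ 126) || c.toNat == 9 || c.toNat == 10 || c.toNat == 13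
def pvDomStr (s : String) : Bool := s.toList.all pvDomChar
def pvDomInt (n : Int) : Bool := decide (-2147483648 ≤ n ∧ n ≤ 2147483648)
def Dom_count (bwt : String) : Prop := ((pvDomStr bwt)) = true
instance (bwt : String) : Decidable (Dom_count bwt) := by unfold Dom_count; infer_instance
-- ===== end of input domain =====

-- B builds the prefix-count table column-by-column (five cumulative passes zipped into rows)
-- instead of A's single row-by-row pass with five counters; same cost, different decomposition.

-- ===== PORT A =====
-- one loop step of A: append the current counter row, then bump the matching counter
def countStepA (st : List (List Int) × Int × Int × Int × Int × Int) (ch : Char) :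
    List (List Int) × Int × Int × Int × Int × Int :=
  let (arr, d, a, c, g, t) := st
  let arr := arr ++ [[d, a, c, g, t]]
  if ch = '$' then (arr, d + 1, a, c, g, t)
  else if ch = 'A' then (arr, d, a + 1, c, g, t)
  else if ch = 'C' then (arr, d, a, c + 1, g, t)
  else if ch = 'G' then (arr, d, a, c, g + 1, t)
  else (arr, d, a, c, g, t + 1)

def count (bwt : String) : List (List Int) :=
  let st := bwt.toList.foldl countStepA ([], 0, 0, 0, 0, 0)
  st.1 ++ [[st.2.1, st.2.2.1, st.2.2.2.1, st.2.2.2.2.1, st.2.2.2.2.2]]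

-- ===== PORT B =====
-- _prefix of Source B: list of n+1 cumulative counts of pred-characters
def prefixCol (bwt : List Char) (pred : Char → Bool) : List Int :=
  (bwt.foldl (fun (st : List Int × Int) ch =>
      let s := st.2 + (if pred ch then 1 else 0)
      (st.1 ++ [s], s)) ([(0 : Int)], 0)).1

-- Python's zip over five equal-length lists (truncates at the shortest)
def zip5 : List Int → List Int → List Int → List Int → List Int → List (List Int)
  | d :: ds, a :: as_, c :: cs, g :: gs, t :: ts =>
      [d, a, c, g, t] :: zip5 ds as_ cs gs ts
  | _, _, _, _, _ => []

def count_alt (bwt : String) : List (List Int) :=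
  let l := bwt.toList
  let d := prefixCol l (fun c => c = '$')
  let a := prefixCol l (fun c => c = 'A')
  let c := prefixCol l (fun c => c = 'C')
  let g := prefixCol l (fun c => c = 'G')
  -- 'c not in '$ACG'' ported exactly as the negated four-way char comparison
  let t := prefixCol l (fun c => !(c = '$' || c = 'A' || c = 'C' || c = 'G'))
  zip5 d a c g t

-- ===== PRECONDITION & SPEC =====
def Spec_count (bwt : String) (out : List (List Int)) : Prop := out = count_alt bwt
instance (bwt : String) (out : List (List Int)) : Decidable (Spec_count bwt out) := by unfold Spec_count; infer_instance

-- ===== CLAIM (what is proved, stated in full; the proofs are below) =====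
def Claim_equal_count : Prop := ∀ (bwt : String), Dom_count bwt → Spec_count bwt (count bwt)

-- ===== LEMMAS AND PROOFS =====

-- common recursive characterisation: the rows of the table starting from given counters
def rows : List Char → Int → Int → Int → Int → Int → List (List Int)
  | [], d, a, c, g, t => [[d, a, c, g, t]]
  | ch :: l, d, a, c, g, t =>
      [d, a, c, g, t] ::
        (if ch = '$' then rows l (d + 1) a c g t
         else if ch = 'A' then rows l d (a + 1) c g t
         else if ch = 'C' then rows l d a (c + 1) g t
         else if ch = 'G' then rows l d a c (g + 1) t
         else rows l d a c g (t + 1))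

lemma countA_rows (l : List Char) :
    ∀ (arr : List (List Int)) (d a c g t : Int),
      (let st := l.foldl countStepA (arr, d, a, c, g, t)
       st.1 ++ [[st.2.1, st.2.2.1, st.2.2.2.1, st.2.2.2.2.1, st.2.2.2.2.2]])
        = arr ++ rows l d a c g t := by
  induction l with
  | nil => intro arr d a c g t; simp [rows]
  | cons ch l ih =>
      intro arr d a c g t
      by_cases h1 : ch = '$'
      · simp [countStepA, rows, h1, ih]
      by_cases h2 : ch = 'A'
      · simp [countStepA, rows, h2, ih]
      by_cases h3 : ch = 'C'
      · simp [countStepA, rows, h3, ih]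
      by_cases h4 : ch = 'G'
      · simp [countStepA, rows, h4, ih]
      · simp [countStepA, rows, h1, h2, h3, h4, ih]

-- tail of prefixCol as a recursion on the list
def pcolRec (pred : Char → Bool) : List Char → Int → List Int
  | [], _ => []
  | ch :: l, s =>
      let s' := s + (if pred ch then 1 else 0)
      s' :: pcolRec pred l s'

lemma prefixCol_fold (pred : Char → Bool) (l : List Char) :
    ∀ (out : List Int) (s : Int),
      (l.foldl (fun (st : List Int × Int) ch =>
          let s := st.2 + (if pred ch then 1 else 0)
          (st.1 ++ [s], s)) (out, s)).1 = out ++ pcolRec pred l s := by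
  induction l with
  | nil => intro out s; simp [pcolRec]
  | cons ch l ih => intro out s; simp [pcolRec, ih, List.append_assoc]

lemma prefixCol_eq (pred : Char → Bool) (l : List Char) :
    prefixCol l pred = 0 :: pcolRec pred l 0 := by
  simp [prefixCol, prefixCol_fold]

lemma zip5_pcol (l : List Char) :
    ∀ (d a c g t : Int),
      zip5 (d :: pcolRec (fun c => c = '$') l d)
           (a :: pcolRec (fun c => c = 'A') l a)
           (c :: pcolRec (fun c => c = 'C') l c)
           (g :: pcolRec (fun c => c = 'G') l g)
           (t :: pcolRec (fun c => !(c = '$' || c = 'A' || c = 'C' || c = 'G')) l t)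
        = rows l d a c g t := by
  induction l with
  | nil => intro d a c g t; simp [zip5, pcolRec, rows]
  | cons ch l ih =>
      intro d a c g t
      simp only [Bool.not_or] at ih
      by_cases h1 : ch = '$'
      · simp [pcolRec, zip5, rows, h1]; rw [← ih]; simp [zip5]
      by_cases h2 : ch = 'A'
      · simp [pcolRec, zip5, rows, h2]; rw [← ih]; simp [zip5]
      by_cases h3 : ch = 'C'
      · simp [pcolRec, zip5, rows, h3]; rw [← ih]; simp [zip5]
      by_cases h4 : ch = 'G'
      · simp [pcolRec, zip5, rows, h4]; rw [← ih]; simp [zip5]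
      · simp [pcolRec, zip5, rows, h1, h2, h3, h4]; rw [← ih]; simp [zip5]

lemma count_alt_rows (bwt : String) :
    count_alt bwt = rows bwt.toList 0 0 0 0 0 := by
  simp only [count_alt, prefixCol_eq]
  exact zip5_pcol _ 0 0 0 0 0

-- ===== VERDICT (by name: the statement is the Claim_ definition above) =====
theorem count_spec : Claim_equal_count := by
  intro bwt _
  show count bwt = count_alt bwt
  rw [count_alt_rows]
  simpa [count] using countA_rows bwt.toList [] 0 0 0 0 0
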